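-- pv_equiv track=rewrite | github.com/SudoKMaar/CodeSentinel | tests/test_analyzer_agent.py | generate_function_with_loops
-- ===== SOURCE A (Python) =====
-- def generate_function_with_loops(name: str = "test_func", num_loops: int = 1) -> str:
--     """Generate a function with loops (complexity = 1 + num_loops)."""
--     code = f"def {name}(items):\n"
--     code += "    result = 0\n"
--     for i in range(num_loops):
--         code += f"    for item in items:\n"
--         code += f"        result += item\n"
--     code += "    return result\n"
--     return code
-- ===== SOURCE B (Python) =====
-- def generate_function_with_loops(name: str = "test_func", num_loops: int = 1) -> str:
--     """Generate a function with loops (complexity = 1 + num_loops)."""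
--     body = "    for item in items:\n        result += item\n"
--     return f"def {name}(items):\n    result = 0\n" + body * num_loops + "    return result\n"
-- ===== Notes on version B (the rewrite author's own statement) =====
-- stated objective: idiomatic
-- what changed: Replaced the accumulation for-loop over range(num_loops) with closed-form string repetition (body * num_loops) in a single concatenation.
import Mathlib
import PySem

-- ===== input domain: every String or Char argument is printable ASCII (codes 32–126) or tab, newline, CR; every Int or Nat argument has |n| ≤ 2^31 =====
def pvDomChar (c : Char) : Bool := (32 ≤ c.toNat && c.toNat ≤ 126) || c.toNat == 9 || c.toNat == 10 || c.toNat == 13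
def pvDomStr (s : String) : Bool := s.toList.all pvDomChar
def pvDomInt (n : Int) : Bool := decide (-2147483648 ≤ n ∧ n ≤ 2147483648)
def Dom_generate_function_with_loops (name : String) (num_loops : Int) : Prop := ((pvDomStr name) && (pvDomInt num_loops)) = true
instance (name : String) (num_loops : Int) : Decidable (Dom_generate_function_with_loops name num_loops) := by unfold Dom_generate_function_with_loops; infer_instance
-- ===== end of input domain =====

-- B replaces A's accumulation for-loop with closed-form string repetition (body * num_loops); same cost, more idiomatic.

-- ===== PORT A =====
def generate_function_with_loops (name : String) (num_loops : Int) : String :=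
  let code := "def " ++ name ++ "(items):\n"
  let code := code ++ "    result = 0\n"
  let code := (PySem.List.pyRange 0 num_loops 1).foldl
    (fun code _ => (code ++ "    for item in items:\n") ++ "        result += item\n") code
  code ++ "    return result\n"

-- ===== PORT B =====
-- Python 'body * num_loops' ported as joining num_loops.toNat copies (non-positive count → empty; exact)
def generate_function_with_loops_alt (name : String) (num_loops : Int) : String :=
  let body := "    for item in items:\n        result += item\n"
  "def " ++ name ++ "(items):\n    result = 0\n" ++
    String.join (List.replicate num_loops.toNat body) ++ "    return result\n"

-- ===== PRECONDITION & SPEC =====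
def Spec_generate_function_with_loops (name : String) (num_loops : Int) (out : String) : Prop := out = generate_function_with_loops_alt name num_loops
instance (name : String) (num_loops : Int) (out : String) : Decidable (Spec_generate_function_with_loops name num_loops out) := by unfold Spec_generate_function_with_loops; infer_instance

-- ===== CLAIM (what is proved, stated in full; the proofs are below) =====
def Claim_equal_generate_function_with_loops : Prop := ∀ (name : String) (num_loops : Int), Dom_generate_function_with_loops name num_loops → Spec_generate_function_with_loops name num_loops (generate_function_with_loops name num_loops)

-- ===== LEMMAS AND PROOFS =====
theorem foldl_append_init (l : List String) (a : String) :
    l.foldl (fun r s => r ++ s) a = a ++ l.foldl (fun r s => r ++ s) "" := by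
  induction l generalizing a with
  | nil => simp
  | cons x xs ih => simp only [List.foldl_cons]; rw [ih, ih ("" ++ x)]; simp [String.append_assoc]

theorem foldl_append_const (l : List Int) (b acc : String) :
    l.foldl (fun c _ => c ++ b) acc = acc ++ String.join (List.replicate l.length b) := by
  induction l generalizing acc with
  | nil => simp [String.join]
  | cons x xs ih =>
      simp only [List.foldl_cons, ih, List.length_cons, List.replicate_succ, String.join]
      rw [foldl_append_init _ ("" ++ b)]; simp [String.append_assoc]

-- ===== VERDICT (by name: the statement is the Claim_ definition above) =====
theorem generate_function_with_loops_spec : Claim_equal_generate_function_with_loops := by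
  intro name num_loops _
  unfold Spec_generate_function_with_loops generate_function_with_loops generate_function_with_loops_alt
  simp only []
  rw [show (fun (code : String) (_ : Int) => (code ++ "    for item in items:\n") ++ "        result += item\n")
        = (fun (code : String) (_ : Int) => code ++ ("    for item in items:\n" ++ "        result += item\n"))
      from by funext c i; rw [String.append_assoc]]
  rw [foldl_append_const, PySem.List.length_pyRange_one]
  simp [String.append_assoc]
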